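-- pv_equiv track=rewrite | github.com/emarberg/stable-grothendieck | utils.py | shifted_ribbon
-- ===== SOURCE A (Python) =====
-- def shifted_ribbon(alpha):
--     nu = []
--     mu = []
--     for i in range(1, len(alpha)):
--         nu.append(sum(alpha[i:]))
--         mu.append(nu[-1] + alpha[i - 1])
--     mu.append(alpha[-1])
--     return tuple(mu), tuple(nu)
-- ===== SOURCE B (Python) =====
-- def shifted_ribbon(alpha):
--     # single right-to-left pass: running suffix total instead of re-summing slices
--     nu_rev = []
--     s = 0
--     for x in reversed(alpha[1:]):
--         s += x
--         nu_rev.append(s)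
--     nu = nu_rev[::-1]
--     mu = [n + a for n, a in zip(nu, alpha)]
--     mu.append(alpha[-1])
--     return tuple(mu), tuple(nu)
-- ===== Notes on version B (the rewrite author's own statement) =====
-- stated objective: faster
-- what changed: Replaces the per-index re-summation of each slice alpha[i:] by one right-to-left pass that maintains a running suffix total (then pairs it with alpha by a zip), turning O(n^2) additions into O(n).
import Mathlib
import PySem

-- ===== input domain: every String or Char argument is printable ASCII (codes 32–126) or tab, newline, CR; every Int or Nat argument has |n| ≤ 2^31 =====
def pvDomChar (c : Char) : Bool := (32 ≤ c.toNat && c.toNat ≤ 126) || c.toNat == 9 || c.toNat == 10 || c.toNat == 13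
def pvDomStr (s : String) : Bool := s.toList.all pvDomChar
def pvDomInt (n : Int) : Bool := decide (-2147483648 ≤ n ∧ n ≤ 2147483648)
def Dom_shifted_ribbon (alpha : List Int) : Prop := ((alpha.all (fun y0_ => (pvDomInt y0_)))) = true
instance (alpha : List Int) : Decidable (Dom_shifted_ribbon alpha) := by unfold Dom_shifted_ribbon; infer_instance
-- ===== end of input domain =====

-- B computes the suffix sums with one right-to-left running total instead of re-summing
-- each slice alpha[i:], changing O(n^2) additions into O(n).

-- ===== PORT A =====
def shifted_ribbon (alpha : List Int) : List (List Int) :=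
  let p := (PySem.List.pyRange 1 alpha.length 1).foldl
    (fun (p : List Int × List Int) i =>
      let nu' := p.1 ++ [(PySem.List.slice alpha (some i) none).sum]
      (nu', p.2 ++ [PySem.List.pyGetD nu' (-1) 0 + PySem.List.pyGetD alpha (i - 1) 0]))
    ([], [])
  [p.2 ++ [PySem.List.pyGetD alpha (-1) 0], p.1]

-- ===== PORT B =====
def shifted_ribbon_alt (alpha : List Int) : List (List Int) :=
  let q := (PySem.List.slice alpha (some 1) none).reverse.foldl
    (fun (q : List Int × Int) x => (q.1 ++ [q.2 + x], q.2 + x)) ([], 0)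
  let nu := q.1.reverse
  let mu := (nu.zip alpha).map (fun p => p.1 + p.2) ++ [PySem.List.pyGetD alpha (-1) 0]
  [mu, nu]

-- ===== PRECONDITION & SPEC =====
-- Pre_ excludes only the empty list, on which the Python A raises IndexError (alpha[-1]).
def Pre_shifted_ribbon (alpha : List Int) : Prop := alpha ≠ []
instance (alpha : List Int) : Decidable (Pre_shifted_ribbon alpha) := by unfold Pre_shifted_ribbon; infer_instance
def pvWitness_shifted_ribbon : List Int := [3, 1, 2]

def Spec_shifted_ribbon (alpha : List Int) (out : List (List Int)) : Prop := out = shifted_ribbon_alt alpha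
instance (alpha : List Int) (out : List (List Int)) : Decidable (Spec_shifted_ribbon alpha out) := by unfold Spec_shifted_ribbon; infer_instance

-- ===== CLAIM (what is proved, stated in full; the proofs are below) =====
def Claim_equal_shifted_ribbon : Prop := ∀ (alpha : List Int), Dom_shifted_ribbon alpha → Pre_shifted_ribbon alpha → Spec_shifted_ribbon alpha (shifted_ribbon alpha)

-- ===== LEMMAS AND PROOFS =====

-- sums of the successive suffixes of a list
def tailsSum : List Int → List Int
  | [] => []
  | x :: t => (x + t.sum) :: tailsSum t

theorem tailsSum_eq_map_range (l : List Int) :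
    tailsSum l = (List.range l.length).map (fun j => (l.drop j).sum) := by
  induction l with
  | nil => simp [tailsSum]
  | cons x t ih =>
    simp [tailsSum, List.range_succ_eq_map, List.map_map, ih, Function.comp]

-- the A-side loop appends one fixed element per index, independently of the accumulator
theorem foldA (alpha : List Int) (R : List Int) (nu0 mu0 : List Int) :
    R.foldl (fun (p : List Int × List Int) i =>
      let nu' := p.1 ++ [(PySem.List.slice alpha (some i) none).sum]
      (nu', p.2 ++ [PySem.List.pyGetD nu' (-1) 0 + PySem.List.pyGetD alpha (i - 1) 0]))
      (nu0, mu0)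
    = (nu0 ++ R.map (fun i => (PySem.List.slice alpha (some i) none).sum),
       mu0 ++ R.map (fun i => (PySem.List.slice alpha (some i) none).sum
                      + PySem.List.pyGetD alpha (i - 1) 0)) := by
  induction R generalizing nu0 mu0 with
  | nil => simp
  | cons i R ih =>
    simp only [List.foldl_cons, List.map_cons, PySem.List.pyGetD_neg_one_append_singleton] at ih ⊢
    rw [ih]; simp

-- cumulative sums produced by the B-side loop
def scanAdd (s : Int) : List Int → List Int
  | [] => []
  | x :: t => (s + x) :: scanAdd (s + x) t

theorem foldB (l : List Int) (acc : List Int) (s : Int) :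
    l.foldl (fun (q : List Int × Int) x => (q.1 ++ [q.2 + x], q.2 + x)) (acc, s)
    = (acc ++ scanAdd s l, s + l.sum) := by
  induction l generalizing acc s with
  | nil => simp [scanAdd]
  | cons x t ih => simp [scanAdd, ih]; ring

theorem scanAdd_append (a b : List Int) (s : Int) :
    scanAdd s (a ++ b) = scanAdd s a ++ scanAdd (s + a.sum) b := by
  induction a generalizing s with
  | nil => simp [scanAdd]
  | cons x t ih => simp [scanAdd, ih]; ring_nf

theorem scanAdd_reverse (l : List Int) :
    (scanAdd 0 l.reverse).reverse = tailsSum l := by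
  induction l with
  | nil => simp [scanAdd, tailsSum]
  | cons x t ih =>
    simp only [List.reverse_cons, scanAdd_append, tailsSum, scanAdd]
    simp [ih, List.sum_reverse]
    ring

theorem length_tailsSum (l : List Int) : (tailsSum l).length = l.length := by
  simp [tailsSum_eq_map_range]

theorem nu_eq (alpha : List Int) :
    (PySem.List.pyRange 1 (alpha.length : Int) 1).map
      (fun i => (PySem.List.slice alpha (some i) none).sum) = tailsSum alpha.tail := by
  rw [PySem.List.pyRange_one, tailsSum_eq_map_range, List.map_map]
  have hlen : (((alpha.length : Int)) - 1).toNat = alpha.tail.length := by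
    simp
  rw [hlen]
  apply List.map_congr_left
  intro k _
  have h1 : (1 + (k : Int)) = ((1 + k : Nat) : Int) := by push_cast; ring
  simp only [Function.comp, h1, PySem.List.slice_from_natCast]
  rw [← List.drop_drop, List.drop_one]

theorem mu_eq (alpha : List Int) :
    (PySem.List.pyRange 1 (alpha.length : Int) 1).map
      (fun i => (PySem.List.slice alpha (some i) none).sum + PySem.List.pyGetD alpha (i - 1) 0)
    = ((tailsSum alpha.tail).zip alpha).map (fun p => p.1 + p.2) := by
  apply List.ext_getElem
  · simp [length_tailsSum, PySem.List.length_pyRange_one, List.length_tail]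
  · intro k hk1 hk2
    have hklt : k < alpha.length - 1 := by
      simpa [PySem.List.length_pyRange_one] using hk1
    have h1 : (1 + (k : Int)) = ((1 + k : Nat) : Int) := by push_cast; ring
    simp only [List.getElem_map, PySem.List.getElem_pyRange_one, List.getElem_zip]
    rw [h1, PySem.List.slice_from_natCast]
    have h2 : ((1 + k : Nat) : Int) - 1 = (k : Int) := by push_cast; ring
    rw [h2, PySem.List.pyGetD_natCast]
    have hk : k < alpha.length := by omega
    have hgetD : alpha.getD k 0 = alpha[k] := List.getD_eq_getElem alpha 0 hk
    have htails : (tailsSum alpha.tail)[k]'(by rw [length_tailsSum]; simp [List.length_tail]; omega)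
        = (alpha.tail.drop k).sum := by
      simp [tailsSum_eq_map_range]
    rw [hgetD, htails, ← List.drop_drop, List.drop_one]

theorem shifted_ribbon_spec : Claim_equal_shifted_ribbon := by
  intro alpha _ _
  unfold Spec_shifted_ribbon shifted_ribbon shifted_ribbon_alt
  simp only [foldA, foldB, List.nil_append, scanAdd_reverse, PySem.List.slice_from_one]
  rw [nu_eq, mu_eq]
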